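-- pv_equiv track=rewrite | github.com/PostHog/posthog.com | scripts/hogfm/handbook/markdown_processor.py | replace_tables_with_description
-- ===== SOURCE A (Python) =====
-- def replace_tables_with_description(text):
--     """
--     Replace markdown tables with a spoken description.
--     Tables are hard to narrate, so we just indicate their presence.
--     """
--     # Find table blocks (consecutive lines starting with |)
--     lines = text.split('\n')
--     result = []
--     in_table = False
--     table_line_count = 0
--
--     for line in lines:
--         is_table_line = line.strip().startswith('|') and line.strip().endswith('|')
--
--         if is_table_line:
--             if not in_table:
--                 # Starting a new table
--                 in_table = True
--                 table_line_count = 1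
--             else:
--                 table_line_count += 1
--         else:
--             if in_table:
--                 # Just finished a table
--                 # Skip separator lines (like |---|---|)
--                 if table_line_count > 1:
--                     result.append('A table is shown here. Please view the handbook page to see the details.')
--                 in_table = False
--                 table_line_count = 0
--
--             result.append(line)
--
--     # Handle case where file ends with a table
--     if in_table and table_line_count > 1:
--         result.append('A table is shown here. Please view the handbook page to see the details.')
--
--     return '\n'.join(result)
-- ===== SOURCE B (Python) =====
-- def replace_tables_with_description(text):
--     """
--     Replace markdown tables with a spoken description.
--     Run-grouping re-implementation: scan runs of table lines with an index
--     loop instead of carrying in_table/table_line_count flags.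
--     """
--     placeholder = 'A table is shown here. Please view the handbook page to see the details.'
--
--     def is_table(line):
--         s = line.strip()
--         return s.startswith('|') and s.endswith('|')
--
--     lines = text.split('\n')
--     out = []
--     i = 0
--     n = len(lines)
--     while i < n:
--         if is_table(lines[i]):
--             j = i + 1
--             while j < n and is_table(lines[j]):
--                 j += 1
--             if j - i > 1:
--                 out.append(placeholder)
--             i = j
--         else:
--             out.append(lines[i])
--             i += 1
--     return '\n'.join(out)
-- ===== Notes on version B (the rewrite author's own statement) =====
-- stated objective: simpler
-- what changed: Replaces the running in_table/table_line_count state machine (with a post-loop fixup for a trailing table) by a run-grouping scan: each maximal run of table lines is consumed in one inner scan and emitted as the placeholder (or dropped if the run has length 1), so no cross-iteration flags or end-of-file special case remain.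
import Mathlib
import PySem

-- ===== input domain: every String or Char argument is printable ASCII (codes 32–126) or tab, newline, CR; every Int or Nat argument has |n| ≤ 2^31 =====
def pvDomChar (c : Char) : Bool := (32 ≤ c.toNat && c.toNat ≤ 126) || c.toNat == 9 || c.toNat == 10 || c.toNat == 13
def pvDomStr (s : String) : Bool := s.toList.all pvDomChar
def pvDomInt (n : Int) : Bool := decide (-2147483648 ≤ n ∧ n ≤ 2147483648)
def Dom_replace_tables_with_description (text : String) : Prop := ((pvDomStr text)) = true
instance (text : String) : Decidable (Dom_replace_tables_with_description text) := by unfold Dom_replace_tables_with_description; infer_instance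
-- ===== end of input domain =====

-- B is a run-grouping rewrite of A's in_table/table_line_count state machine; same behaviour, simpler decomposition.

-- text.split('\n'), exact: the literal separator is non-empty
def pvLines (text : String) : List String :=
  (PySem.Chars.splitOn text.toList ['\n']).map String.ofList

def pvPlaceholder : String := "A table is shown here. Please view the handbook page to see the details."

-- line.strip().startswith('|') and line.strip().endswith('|')  (shared line predicate of both sources)
def pvIsTableLine (line : String) : Bool :=
  PySem.Str.startswith (PySem.Str.strip line) "|" && PySem.Str.endswith (PySem.Str.strip line) "|"

-- ===== PORT A =====
-- loop body: state (result, in_table, table_line_count)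
def pvStepA (st : List String × Bool × Nat) (line : String) : List String × Bool × Nat :=
  let res := st.1; let inT := st.2.1; let cnt := st.2.2
  if pvIsTableLine line then
    if !inT then (res, true, 1) else (res, true, cnt + 1)
  else
    if inT then
      ((if cnt > 1 then res ++ [pvPlaceholder] else res) ++ [line], false, 0)
    else
      (res ++ [line], false, 0)

-- post-loop: handle case where file ends with a table
def pvFinishA (st : List String × Bool × Nat) : List String :=
  if st.2.1 && st.2.2 > 1 then st.1 ++ [pvPlaceholder] else st.1

def replace_tables_with_description (text : String) : String :=
  PySem.Str.join "\n" (pvFinishA ((pvLines text).foldl pvStepA ([], false, 0)))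

-- ===== PORT B =====
-- run-grouping scan: consume each maximal run of table lines in one inner scan (the j-while loop)
def pvRunB : List String → List String
  | [] => []
  | l :: rest =>
    if pvIsTableLine l then
      let run := rest.takeWhile pvIsTableLine
      let after := rest.dropWhile pvIsTableLine
      (if run.length + 1 > 1 then [pvPlaceholder] else []) ++ pvRunB after
    else
      l :: pvRunB rest
termination_by ls => ls.length
decreasing_by
  · exact Nat.lt_succ_of_le (List.length_dropWhile_le _ rest)
  · simp

def replace_tables_with_description_alt (text : String) : String :=
  PySem.Str.join "\n" (pvRunB (pvLines text))

-- ===== PRECONDITION & SPEC =====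
def Spec_replace_tables_with_description (text : String) (out : String) : Prop := out = replace_tables_with_description_alt text
instance (text : String) (out : String) : Decidable (Spec_replace_tables_with_description text out) := by unfold Spec_replace_tables_with_description; infer_instance

-- ===== CLAIM (what is proved, stated in full; the proofs are below) =====
def Claim_equal_replace_tables_with_description : Prop := ∀ (text : String), Dom_replace_tables_with_description text → Spec_replace_tables_with_description text (replace_tables_with_description text)

-- ===== LEMMAS AND PROOFS =====

-- Joint loop invariant: A's fold+finish from the out-of-table state produces res ++ pvRunB lines,
-- and from the in-table state (any count) the pending run is finished exactly as B finishes it.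
theorem pvKey (lines : List String) :
    (∀ res : List String,
      pvFinishA (lines.foldl pvStepA (res, false, 0)) = res ++ pvRunB lines)
    ∧ (∀ (res : List String) (cnt : Nat),
      pvFinishA (lines.foldl pvStepA (res, true, cnt)) =
        res ++ (if cnt + (lines.takeWhile pvIsTableLine).length > 1 then [pvPlaceholder] else [])
            ++ pvRunB (lines.dropWhile pvIsTableLine)) := by
  induction lines with
  | nil =>
    constructor
    · intro res; simp [pvFinishA, pvRunB]
    · intro res cnt
      simp only [List.foldl_nil, List.takeWhile_nil, List.dropWhile_nil, pvFinishA, pvRunB]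
      by_cases h : cnt > 1 <;> simp [h]
  | cons l ls ih =>
    constructor
    · intro res
      by_cases h : pvIsTableLine l
      · rw [List.foldl_cons, show pvStepA (res, false, 0) l = (res, true, 1) by
          simp [pvStepA, h]]
        rw [ih.2 res 1]
        rw [show pvRunB (l :: ls) =
          (if (ls.takeWhile pvIsTableLine).length + 1 > 1 then [pvPlaceholder] else []) ++
            pvRunB (ls.dropWhile pvIsTableLine) by rw [pvRunB]; simp [h]]
        have hiff : 1 + (ls.takeWhile pvIsTableLine).length > 1
            ↔ (ls.takeWhile pvIsTableLine).length + 1 > 1 := by omega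
        simp only [hiff, List.append_assoc]
      · rw [List.foldl_cons, show pvStepA (res, false, 0) l = (res ++ [l], false, 0) by
          simp [pvStepA, h]]
        rw [ih.1 (res ++ [l]),
          show pvRunB (l :: ls) = l :: pvRunB ls by rw [pvRunB]; simp [h]]
        simp
    · intro res cnt
      by_cases h : pvIsTableLine l
      · rw [List.foldl_cons, show pvStepA (res, true, cnt) l = (res, true, cnt + 1) by
          simp [pvStepA, h]]
        rw [ih.2 res (cnt + 1)]
        rw [List.takeWhile_cons_of_pos h, List.dropWhile_cons_of_pos h]
        simp only [List.length_cons]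
        have hiff : cnt + 1 + (ls.takeWhile pvIsTableLine).length > 1
            ↔ cnt + ((ls.takeWhile pvIsTableLine).length + 1) > 1 := by omega
        rw [if_congr hiff rfl rfl]
        rfl
      · rw [List.foldl_cons, show pvStepA (res, true, cnt) l =
            ((if cnt > 1 then res ++ [pvPlaceholder] else res) ++ [l], false, 0) by
          simp [pvStepA, h]]
        rw [ih.1 _]
        rw [List.takeWhile_cons_of_neg h, List.dropWhile_cons_of_neg h,
          show pvRunB (l :: ls) = l :: pvRunB ls by rw [pvRunB]; simp [h]]
        simp only [List.length_nil, Nat.add_zero]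
        split_ifs with h1 <;> simp

-- ===== VERDICT (by name: the statement is the Claim_ definition above) =====
theorem replace_tables_with_description_spec : Claim_equal_replace_tables_with_description := by
  intro text _
  unfold Spec_replace_tables_with_description
  unfold replace_tables_with_description replace_tables_with_description_alt
  rw [(pvKey (pvLines text)).1 []]
  simp
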